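-- pv_equiv track=rewrite | github.com/SomilKSharma/AdvancedDSA | Heaps/productof3.py | solve
-- ===== SOURCE A (Python) =====
-- from heapq import heappop, heappush
--
-- def solve(A):
--
--     #create a min heap
--     min_heap=[]
--
--     #get an answer array with -1 as first two values
--     answer=[-1,-1]
--
--     #get a product variable
--     product=1
--
--     #iterate for the first three values
--     for index in range(3):
--         #append the values
--         heappush(min_heap,A[index])
--         product=product*A[index]
--
--     #append the product in the answer array
--     answer.append(product)
--
--     #iterate for all other values in the array using sliding window
--     for value in A[3:]:
--         #check for value being among the three greatest
--         if value>min_heap[0]: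
--             #remove the minimum element in the heap
--             mini=heappop(min_heap)
--             #remove it from the product
--             product=product//mini
--             #add the value to the min heap and to the product
--             heappush(min_heap,value)
--             product=product*value
--         #add value to the answer array
--         answer.append(product)
--
--     #return the answer array
--     return answer
-- ===== SOURCE B (Python) =====
-- def solve(A):
--     answer = [-1, -1]
--     pre = []
--     for v in A:
--         pre.append(v)
--         pre.sort()
--         if len(pre) >= 3:
--             answer.append(pre[-1] * pre[-2] * pre[-3])
--     return answer
-- ===== Notes on version B (the rewrite author's own statement) =====
-- stated objective: alternative
-- what changed: Drops the 3-element min-heap and the incremental product//mini*value bookkeeping entirely: B keeps ALL values seen so far in one sorted list (append + sort per step, cheap on an almost-sorted list) and reads the answer afresh each step as the product of its last three entries, with no running product and no division.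
-- crash fix: A raises IndexError on lists shorter than 3 and ZeroDivisionError on lists where, at some position i >= 3, the third-largest value of A[:i] is 0 and A[i] > 0 (product // 0); B performs no indexing past the data and no division, and returns the list of running products there (just [-1, -1] when fewer than three elements exist). — e.g. on solve([1, 1, 0, 2]): A raises ZeroDivisionError, B returns [-1, -1, 0, 2]
import Mathlib
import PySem

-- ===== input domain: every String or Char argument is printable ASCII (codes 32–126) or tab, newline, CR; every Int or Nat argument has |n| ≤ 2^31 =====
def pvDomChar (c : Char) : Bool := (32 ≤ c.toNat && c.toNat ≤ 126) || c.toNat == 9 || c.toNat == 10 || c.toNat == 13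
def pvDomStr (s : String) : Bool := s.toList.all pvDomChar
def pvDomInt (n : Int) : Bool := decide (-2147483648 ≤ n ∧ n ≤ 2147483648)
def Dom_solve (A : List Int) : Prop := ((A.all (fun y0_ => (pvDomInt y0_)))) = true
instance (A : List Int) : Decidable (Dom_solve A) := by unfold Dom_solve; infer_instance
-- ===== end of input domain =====

-- B drops the 3-element min-heap and the incremental 'product // mini * value' bookkeeping:
-- it keeps ALL values seen so far in one sorted list (append + sort each step) and reads the
-- answer afresh as the product of that list's last three entries; objective: alternative
-- (no running product, no division; B mutates only its own locals).

-- ===== PORT A =====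
-- heapq on the 3-element min-heap, modeled by its element multiset kept in ascending order:
-- heap[0] is the minimum and heappop removes it, which is all the Python observes; exact here.
def pvHeappush (h : List Int) (v : Int) : List Int := List.orderedInsert (· ≤ ·) v h
def pvHeappop (h : List Int) : Int × List Int := (h.headI, h.tail)

def pvStepA (s : List Int × Int × List Int) (v : Int) : List Int × Int × List Int :=
  let h := s.1
  let p := s.2.1
  let ans := s.2.2
  if h.headI < v then            -- value > min_heap[0]; the heap always has 3 elements here
    let pop := pvHeappop h
    let p1 := PySem.Int.floordiv p pop.1   -- product // mini; mini = 0 is excluded by Pre_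
    let h1 := pvHeappush pop.2 v
    let p2 := p1 * v
    (h1, p2, ans ++ [p2])
  else (h, p, ans ++ [p])

def solve (A : List Int) : List Int :=
  -- 'for index in range(3)': A[index] raises IndexError when len(A) < 3 (excluded by Pre_),
  -- so the lookup is ported as pyGetD with default 0
  let s0 := (PySem.List.pyRange 0 3 1).foldl
      (fun (s : List Int × Int) i =>
        (pvHeappush s.1 (PySem.List.pyGetD A i 0), s.2 * PySem.List.pyGetD A i 0))
      ([], 1)
  let answer := [-1, -1] ++ [s0.2]
  let r := (PySem.List.slice A (some 3) none).foldl pvStepA (s0.1, s0.2, answer)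
  r.2.2

-- ===== PORT B =====
def pvStepB (s : List Int × List Int) (v : Int) : List Int × List Int :=
  let pre := PySem.List.sorted (s.1 ++ [v]) (fun t => t)   -- pre.append(v); pre.sort()
  if 3 ≤ pre.length then
    -- pre[-1] * pre[-2] * pre[-3]: valid negative indices since len(pre) ≥ 3, ported as pyGetD
    (pre, s.2 ++ [PySem.List.pyGetD pre (-1) 0 * PySem.List.pyGetD pre (-2) 0 *
                  PySem.List.pyGetD pre (-3) 0])
  else (pre, s.2)

def solve_alt (A : List Int) : List Int := (A.foldl pvStepB ([], [-1, -1])).2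

-- ===== PRECONDITION & SPEC =====
-- third-largest value of l (0 if absent): entry len-3 of the ascending sort
def pvThirdAsc (l : List Int) : Int :=
  (PySem.List.sorted l (fun t => t)).getD (l.length - 3) 0

-- Pre_ excludes exactly the inputs on which A raises: lists shorter than 3 (IndexError on
-- A[index]) and lists where at some position i ≥ 3 the third-largest value of A[:i] is 0
-- while A[i] > 0 (ZeroDivisionError at 'product // mini'); everywhere else A returns.
def Pre_solve (A : List Int) : Prop :=
  3 ≤ A.length ∧
  ¬ ∃ i ∈ List.range A.length, 3 ≤ i ∧ pvThirdAsc (A.take i) = 0 ∧ 0 < A.getD i 0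
instance (A : List Int) : Decidable (Pre_solve A) := by unfold Pre_solve; infer_instance
def pvWitness_solve : List Int := [3, 1, 2, 5, 4]

-- A raises IndexError on lists shorter than 3 and ZeroDivisionError where at some i ≥ 3 the
-- third-largest value of A[:i] is 0 and A[i] > 0; B indexes and divides nothing, returning the
-- list of running products there (just [-1, -1] when fewer than three elements exist).
def Raises_solve (A : List Int) : Prop :=
  A.length < 3 ∨
  ∃ i ∈ List.range A.length, 3 ≤ i ∧ pvThirdAsc (A.take i) = 0 ∧ 0 < A.getD i 0
instance (A : List Int) : Decidable (Raises_solve A) := by unfold Raises_solve; infer_instance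
def pvRaiseWitness_solve : List Int := [1, 1, 0, 2]
def pvRaiseWitnessOut_solve : List Int := [-1, -1, 0, 2]

def Spec_solve (A : List Int) (out : List Int) : Prop := out = solve_alt A
instance (A : List Int) (out : List Int) : Decidable (Spec_solve A out) := by unfold Spec_solve; infer_instance

-- ===== CLAIM (what is proved, stated in full; the proofs are below) =====
def Claim_equal_solve : Prop := ∀ (A : List Int), Dom_solve A → Pre_solve A → Spec_solve A (solve A)
def Claim_raises_solve : Prop :=
  (∀ (A : List Int), Dom_solve A → Raises_solve A → ¬ Pre_solve A) ∧
  (Dom_solve (pvRaiseWitness_solve) ∧ Raises_solve (pvRaiseWitness_solve) ∧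
    solve_alt (pvRaiseWitness_solve) = pvRaiseWitnessOut_solve)

-- ===== LEMMAS AND PROOFS =====

-- A's exact integer division: (a*k) // a = k for a ≠ 0
lemma pvFloordivCancel (a k : Int) (ha : a ≠ 0) : PySem.Int.floordiv (a * k) a = k := by
  have h1 := PySem.Int.floordiv_mul_add_mod (a * k) a
  have h2 : PySem.Int.mod (a * k) a = 0 := by
    rw [PySem.Int.mod_eq_zero_iff_dvd]
    exact Dvd.intro k rfl
  rw [h2, add_zero] at h1
  have : PySem.Int.floordiv (a * k) a * a = k * a := by rw [h1]; ring
  exact mul_right_cancel₀ ha this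

-- heappush of v into the 2-element tail [b,c] yields a sorted triple, a permutation of [v,b,c]
lemma pvPush3 (b c v : Int) (hbc : b ≤ c) :
    ∃ a' b' c', pvHeappush [b, c] v = [a', b', c'] ∧ a' ≤ b' ∧ b' ≤ c' ∧
      ([a', b', c'] : List Int).Perm [v, b, c] := by
  simp only [pvHeappush, List.orderedInsert]
  split_ifs with h1 h2
  · exact ⟨v, b, c, rfl, h1, hbc, List.Perm.refl _⟩
  · exact ⟨b, v, c, rfl, by omega, h2, List.Perm.swap v b [c]⟩
  · exact ⟨b, c, v, rfl, hbc, by omega, List.perm_append_singleton v [b, c]⟩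

-- pre[-1], pre[-2], pre[-3] of a list ending in [p, q, r]
lemma pvNeg1 (l : List Int) (p q r : Int) :
    PySem.List.pyGetD (l ++ [p, q, r]) (-1) 0 = r := by
  rw [PySem.List.pyGetD_neg_ofNat _ 1 0 (by omega) (by simp)]
  simp [List.getElem_append_right]
lemma pvNeg2 (l : List Int) (p q r : Int) :
    PySem.List.pyGetD (l ++ [p, q, r]) (-2) 0 = q := by
  rw [PySem.List.pyGetD_neg_ofNat _ 2 0 (by omega) (by simp)]
  simp [List.getElem_append_right]
lemma pvNeg3 (l : List Int) (p q r : Int) :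
    PySem.List.pyGetD (l ++ [p, q, r]) (-3) 0 = p := by
  rw [PySem.List.pyGetD_neg_ofNat _ 3 0 (by omega) (by simp)]
  simp [List.getElem_append_right]

-- the loop coupling: A's heap is [a,b,c], B's sorted prefix is init ++ [a,b,c], A's running
-- product is a*b*c, and both answer lists agree so far
lemma pvLoop (A0 : List Int)
    (hnc : ∀ i ∈ List.range A0.length, 3 ≤ i → pvThirdAsc (A0.take i) = 0 → ¬ 0 < A0.getD i 0) :
    ∀ (rest pfx init : List Int) (a b c p : Int) (ansA ansB : List Int),
      A0 = pfx ++ rest →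
      PySem.List.sorted pfx (fun t => t) = init ++ [a, b, c] →
      p = a * b * c →
      ansA = ansB →
      (rest.foldl pvStepA ([a, b, c], p, ansA)).2.2 =
      (rest.foldl pvStepB (init ++ [a, b, c], ansB)).2 := by
  intro rest
  induction rest with
  | nil => intro pfx init a b c p ansA ansB _ _ _ hans; simpa using hans
  | cons v rest ih =>
    intro pfx init a b c p ansA ansB hA hsa hp hans
    -- order facts about the sorted prefix
    have hpw : List.Pairwise (fun x y : Int => x ≤ y) (init ++ [a, b, c]) := by
      have := PySem.List.sorted_pairwise pfx (fun t : Int => t)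
      rwa [hsa] at this
    rw [List.pairwise_append] at hpw
    obtain ⟨hinit, habc, hbound⟩ := hpw
    obtain ⟨h1abc, hrest⟩ := List.pairwise_cons.mp habc
    obtain ⟨h2abc, _⟩ := List.pairwise_cons.mp hrest
    have hab : a ≤ b := h1abc b (by simp)
    have hbc : b ≤ c := h2abc c (by simp)
    have hba : ∀ x ∈ init, x ≤ a := fun x hx => hbound x hx a (by simp)
    have hlenpfx : pfx.length = init.length + 3 := by
      have := PySem.List.length_sorted pfx (fun t : Int => t) false
      rw [hsa] at this; simp at this; omega
    -- the new sorted prefix is sorted(pfx ++ [v]) no matter how it is computed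
    have hresort : PySem.List.sorted ((init ++ [a, b, c]) ++ [v]) (fun t : Int => t) =
        PySem.List.sorted (pfx ++ [v]) (fun t : Int => t) := by
      apply PySem.List.sorted_eq_sorted_of_perm _ _ _ (fun x y h => h)
      exact ((PySem.List.sorted_perm pfx (fun t : Int => t) false).symm.trans
        (by rw [hsa])).symm.append_right [v]
    simp only [List.foldl_cons]
    by_cases hv : a < v
    · -- the new value enters the top three
      have hA' : pvStepA ([a, b, c], p, ansA) v =
          (pvHeappush [b, c] v, PySem.Int.floordiv p a * v,
            ansA ++ [PySem.Int.floordiv p a * v]) := by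
        simp [pvStepA, pvHeappop, hv]
      -- a ≠ 0, from the no-crash hypothesis at position pfx.length
      have ha0 : a ≠ 0 := by
        intro h0
        have hi : pfx.length ∈ List.range A0.length := by
          rw [hA]; simp
        have htake : A0.take pfx.length = pfx := by rw [hA]; exact List.take_left
        have hthird : pvThirdAsc pfx = 0 := by
          unfold pvThirdAsc
          rw [hsa, hlenpfx]
          simp [h0]
        have hget : A0.getD pfx.length 0 = v := by
          rw [hA, List.getD_append_right _ _ _ _ (le_refl _)]
          simp
        have := hnc pfx.length hi (by omega) (by rw [htake]; exact hthird)
        rw [hget] at this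
        exact this (h0 ▸ hv)
      have hdiv : PySem.Int.floordiv p a = b * c := by
        rw [hp, mul_comm a b]
        have : b * a * c = a * (b * c) := by ring
        rw [this]
        exact pvFloordivCancel a (b * c) ha0
      obtain ⟨a', b', c', hpush, hab', hbc', hperm⟩ := pvPush3 b c v hbc
      -- B's new sorted prefix is (init ++ [a]) ++ [a', b', c']
      have hsa' : PySem.List.sorted (pfx ++ [v]) (fun t : Int => t) =
          (init ++ [a]) ++ [a', b', c'] := by
        rw [← hresort]
        apply PySem.List.sorted_id_eq_of_perm_of_pairwise
        · have h1 : ((a :: [a', b', c']) : List Int).Perm (a :: [v, b, c]) := hperm.cons a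
          have h2 : ((a :: ([b, c] ++ [v])) : List Int).Perm (a :: [v, b, c]) :=
            (List.perm_append_singleton v [b, c]).cons a
          have h3 := List.Perm.append_left init (h1.trans h2.symm)
          rw [List.append_assoc, List.append_assoc]
          exact h3
        · rw [List.pairwise_append]
          refine ⟨?_, ?_, ?_⟩
          · rw [List.pairwise_append]
            refine ⟨hinit, by simp, ?_⟩
            intro x hx y hy
            simp at hy
            subst hy
            exact hba x hx
          · refine List.pairwise_cons.mpr ⟨?_, List.pairwise_cons.mpr ⟨?_, ?_⟩⟩
            · intro t ht; simp at ht; rcases ht with h | h <;> omega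
            · intro t ht; simp at ht; omega
            · simp
          · intro x hx y hy
            have hxa : x ≤ a := by
              simp at hx
              rcases hx with hx | hx
              · exact hba x hx
              · omega
            have hya : a ≤ y := by
              have := hperm.mem_iff.mp hy
              simp at this
              rcases this with h | h | h <;> omega
            omega
      have hB' : pvStepB (init ++ [a, b, c], ansB) v =
          ((init ++ [a]) ++ [a', b', c'],
            ansB ++ [c' * b' * a']) := by
        simp only [pvStepB, hresort, hsa']
        rw [if_pos (by simp)]
        rw [pvNeg1, pvNeg2, pvNeg3]
      have hprod : a' * b' * c' = v * b * c := by
        have h := hperm.prod_eq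
        simp only [List.prod_cons, List.prod_nil] at h
        linear_combination h
      rw [hA', hB', hpush]
      have hval : b * c * v = c' * b' * a' := by linear_combination -hprod
      exact ih (pfx ++ [v]) (init ++ [a]) a' b' c' _ _ _
        (by rw [hA]; simp)
        hsa'
        (by rw [hdiv]; linear_combination -hprod)
        (by rw [hans, hdiv, hval])
    · -- value not among the three greatest: the top three and the product are unchanged
      have hA' : pvStepA ([a, b, c], p, ansA) v = ([a, b, c], p, ansA ++ [p]) := by
        simp [pvStepA, hv]
      have hva : v ≤ a := by omega
      -- B's new sorted prefix is (insert v into init) ++ [a, b, c]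
      have hsa' : PySem.List.sorted (pfx ++ [v]) (fun t : Int => t) =
          (pvHeappush init v) ++ [a, b, c] := by
        rw [← hresort]
        apply PySem.List.sorted_id_eq_of_perm_of_pairwise
        · have h1 : (pvHeappush init v ++ [a, b, c] : List Int).Perm
              ((v :: init) ++ [a, b, c]) :=
            (List.perm_orderedInsert _ v init).append_right [a, b, c]
          have h2 : (((init ++ [a, b, c]) ++ [v]) : List Int).Perm
              (v :: (init ++ [a, b, c])) :=
            List.perm_append_singleton v (init ++ [a, b, c])
          exact h1.trans h2.symm
        · rw [List.pairwise_append]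
          refine ⟨List.Pairwise.orderedInsert v init hinit, ?_, ?_⟩
          · refine List.pairwise_cons.mpr ⟨?_, List.pairwise_cons.mpr ⟨?_, ?_⟩⟩
            · intro t ht; simp at ht; rcases ht with h | h <;> omega
            · intro t ht; simp at ht; omega
            · simp
          intro x hx y hy
          have hxa : x ≤ a := by
            rcases (List.mem_orderedInsert _).mp hx with h | h
            · omega
            · exact hba x h
          simp at hy
          rcases hy with h | h | h <;> omega
      have hB' : pvStepB (init ++ [a, b, c], ansB) v =
          ((pvHeappush init v) ++ [a, b, c], ansB ++ [c * b * a]) := by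
        simp only [pvStepB, hresort, hsa']
        rw [if_pos (by simp)]
        rw [pvNeg1, pvNeg2, pvNeg3]
      rw [hA', hB']
      have hval : p = c * b * a := by rw [hp]; ring
      exact ih (pfx ++ [v]) (pvHeappush init v) a b c p _ _
        (by rw [hA]; simp) hsa' hp
        (by rw [hans, hval])

-- pushing three values gives a sorted 3-element list that is a permutation of [x, y, z]
lemma pvInit3 (x y z : Int) :
    ∃ a b c, pvHeappush (pvHeappush (pvHeappush [] x) y) z = [a, b, c] ∧
      PySem.List.sorted ([x, y, z] : List Int) (fun t => t) = [a, b, c] ∧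
      ([a, b, c] : List Int).Perm [x, y, z] := by
  have h1 : pvHeappush ([] : List Int) x = [x] := rfl
  have hperm : (pvHeappush (pvHeappush (pvHeappush [] x) y) z).Perm [x, y, z] := by
    have s1 : (pvHeappush (pvHeappush [x] y) z).Perm (z :: pvHeappush [x] y) :=
      List.perm_orderedInsert _ z _
    have s2 : ((z :: pvHeappush [x] y) : List Int).Perm (z :: y :: [x]) :=
      (List.perm_orderedInsert _ y [x]).cons z
    have s3 : ([z, y, x] : List Int).Perm [x, y, z] := by
      simpa using List.reverse_perm [x, y, z]
    exact (s1.trans s2).trans s3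
  have hpw : List.Pairwise (fun p q : Int => p ≤ q)
      (pvHeappush (pvHeappush (pvHeappush [] x) y) z) := by
    apply List.Pairwise.orderedInsert
    apply List.Pairwise.orderedInsert
    simp [pvHeappush]
  have hlen : (pvHeappush (pvHeappush (pvHeappush [] x) y) z).length = 3 := by
    simp only [pvHeappush, List.orderedInsert_length, List.length_nil]
  match hh : pvHeappush (pvHeappush (pvHeappush [] x) y) z, hlen with
  | [a, b, c], _ =>
    refine ⟨a, b, c, rfl, ?_, hh ▸ hperm⟩
    exact PySem.List.sorted_id_eq_of_perm_of_pairwise _ _ (hh ▸ hperm) (hh ▸ hpw)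

-- ===== VERDICT (by name: the statement is the Claim_ definition above) =====
theorem solve_spec : Claim_equal_solve := by
  intro A _ hpre
  obtain ⟨hlen, hnoc⟩ := hpre
  have hnc : ∀ i ∈ List.range A.length, 3 ≤ i → pvThirdAsc (A.take i) = 0 →
      ¬ 0 < A.getD i 0 := by
    intro i hi h3 hth hpos
    exact hnoc ⟨i, hi, h3, hth, hpos⟩
  obtain ⟨x, y, z, rest, rfl⟩ : ∃ x y z rest, A = x :: y :: z :: rest := by
    match A, hlen with
    | x :: y :: z :: rest, _ => exact ⟨x, y, z, rest, rfl⟩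
  unfold Spec_solve solve solve_alt
  have hr : PySem.List.pyRange 0 3 1 = [0, 1, 2] := by decide
  have hg0 : PySem.List.pyGetD (x :: y :: z :: rest) (0 : Int) 0 = x := by
    simp [PySem.List.pyGetD_ofNat']
  have hg1 : PySem.List.pyGetD (x :: y :: z :: rest) (1 : Int) 0 = y := by
    simp [PySem.List.pyGetD_ofNat']
  have hg2 : PySem.List.pyGetD (x :: y :: z :: rest) (2 : Int) 0 = z := by
    simp [PySem.List.pyGetD_ofNat']
  have hsl : PySem.List.slice (x :: y :: z :: rest) (some 3) none = rest := by
    have h3 : ((3 : Nat) : Int) = (3 : Int) := by norm_num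
    rw [← h3, PySem.List.slice_from_natCast]
    rfl
  simp only [hr, List.foldl_cons, List.foldl_nil, hg0, hg1, hg2, hsl]
  obtain ⟨a, b, c, hheap, hsorted3, hperm3⟩ := pvInit3 x y z
  -- B's first three steps
  have hb1 : pvStepB ([], [-1, -1]) x = (PySem.List.sorted [x] (fun t => t), [-1, -1]) := by
    rw [pvStepB]
    rw [if_neg (by rw [PySem.List.length_sorted]; simp)]
    rfl
  have hs1 : PySem.List.sorted ([x] : List Int) (fun t => t) = [x] :=
    PySem.List.sorted_id_eq_of_perm_of_pairwise _ _ (List.Perm.refl _) (by simp)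
  have hb2 : pvStepB ([x], [-1, -1]) y = (PySem.List.sorted [x, y] (fun t => t), [-1, -1]) := by
    rw [pvStepB]
    rw [if_neg (by rw [PySem.List.length_sorted]; simp)]
    rfl
  have hs3 : PySem.List.sorted (PySem.List.sorted ([x, y] : List Int) (fun t => t) ++ [z])
      (fun t : Int => t) = [a, b, c] := by
    rw [← hsorted3]
    apply PySem.List.sorted_eq_sorted_of_perm _ _ _ (fun p q h => h)
    exact (PySem.List.sorted_perm ([x, y] : List Int) (fun t => t) false).append_right [z]
  have hb3 : pvStepB (PySem.List.sorted ([x, y] : List Int) (fun t => t), [-1, -1]) z =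
      ([a, b, c], [-1, -1, c * b * a]) := by
    rw [pvStepB]
    simp only [hs3]
    rw [if_pos (by simp)]
    have h1 : PySem.List.pyGetD ([a, b, c] : List Int) (-1) 0 = c := pvNeg1 [] a b c
    have h2 : PySem.List.pyGetD ([a, b, c] : List Int) (-2) 0 = b := pvNeg2 [] a b c
    have h3 : PySem.List.pyGetD ([a, b, c] : List Int) (-3) 0 = a := pvNeg3 [] a b c
    rw [h1, h2, h3]
    rfl
  have hprod : a * b * c = x * y * z := by
    have h := hperm3.prod_eq
    simp only [List.prod_cons, List.prod_nil] at h
    linear_combination h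
  rw [hb1, hs1, hb2, hb3, hheap]
  have hans0 : ([-1, -1, 1 * x * y * z] : List Int) = [-1, -1, c * b * a] := by
    have h : (1 * x * y * z : Int) = c * b * a := by linear_combination -hprod
    rw [h]
  have := pvLoop (x :: y :: z :: rest) hnc rest [x, y, z] [] a b c (1 * x * y * z)
    ([-1, -1, 1 * x * y * z]) ([-1, -1, c * b * a])
    rfl (by simpa using hsorted3) (by linear_combination -hprod)
    hans0
  simpa using this

@[simp] theorem solve_raises : Claim_raises_solve := by
  unfold Claim_raises_solve
  constructor
  · intro A _ hr hpre
    obtain ⟨hlen, hnoc⟩ := hpre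
    rcases hr with h | h
    · omega
    · exact hnoc h
  · exact ⟨by decide, by decide, by decide⟩
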